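-- pv_equiv track=rewrite | github.com/IkoStirling/CPlusLearningNote | note/stableDiffusion/wai_find_clip.py | group_by_first_word
-- ===== SOURCE A (Python) =====
-- def group_by_first_word(text_lines):
--     groups = {}
--
--     for line in text_lines:
--         line = line.strip()
--         if not line or ',' not in line:
--             continue
--
--         # 分割第一个逗号
--         parts = line.split(',', 1)
--         first_word = parts[0].strip()
--         rest_of_line = parts[1].strip()
--
--         # 添加到对应的分组
--         if first_word not in groups:
--             groups[first_word] = []
--         groups[first_word].append(f"{first_word}, {rest_of_line}")
--
--     return groups
-- ===== SOURCE B (Python) =====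
-- def group_by_first_word(text_lines):
--     # Phase 1: parse every usable line into (first_word, rest) pairs.
--     pairs = []
--     for line in text_lines:
--         line = line.strip()
--         if line and ',' in line:
--             first, rest = line.split(',', 1)
--             pairs.append((first.strip(), rest.strip()))
--     # Phase 2: distinct keys in first-appearance order, then build each group by filtering.
--     keys = list(dict.fromkeys(first for first, _ in pairs))
--     return {k: [f"{k}, {rest}" for first, rest in pairs if first == k] for k in keys}
-- ===== Notes on version B (the rewrite author's own statement) =====
-- stated objective: alternative
-- what changed: Replaces the on-the-fly dict grouping with a three-phase pipeline: parse all lines into (key, rest) pairs, dedup the keys in first-appearance order with dict.fromkeys, then build each group by a filtering comprehension over the pair table.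
import Mathlib
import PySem

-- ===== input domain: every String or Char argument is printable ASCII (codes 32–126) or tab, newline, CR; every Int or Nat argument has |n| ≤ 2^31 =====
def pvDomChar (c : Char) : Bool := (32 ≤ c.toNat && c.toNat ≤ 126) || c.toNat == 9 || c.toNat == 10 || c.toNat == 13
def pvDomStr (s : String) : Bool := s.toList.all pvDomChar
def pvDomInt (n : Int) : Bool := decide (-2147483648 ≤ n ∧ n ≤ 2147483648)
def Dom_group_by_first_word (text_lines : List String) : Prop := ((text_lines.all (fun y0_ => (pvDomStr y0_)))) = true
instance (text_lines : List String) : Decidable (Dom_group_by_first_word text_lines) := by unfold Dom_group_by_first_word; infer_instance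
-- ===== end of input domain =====

-- B replaces A's on-the-fly dict grouping by parse-all / dedup-keys / filter-per-key phases (objective: alternative decomposition).

-- ===== PORT A =====
-- the body after the `continue` guard: ensure the key exists, then groups[first_word].append(...)
-- (the key exists when modify runs, so modify is exactly the in-place append)
def pvGroupAdd (groups : PySem.Dict String (List String)) (first_word rest_of_line : String) :
    PySem.Dict String (List String) :=
  (if !(groups.contains first_word) then groups.insert first_word [] else groups).modify
    first_word [] (fun v => v ++ [first_word ++ ", " ++ rest_of_line])

-- one loop iteration of A; `.getD 0/1 ""` is exact because ',' ∈ line guarantees split(',',1) has two parts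
def pvGroupLine (groups : PySem.Dict String (List String)) (line : String) : PySem.Dict String (List String) :=
  if PySem.Str.strip line = "" || !(PySem.Str.isIn "," (PySem.Str.strip line)) then groups
  else
    pvGroupAdd groups
      (PySem.Str.strip (((PySem.Str.splitMax? (PySem.Str.strip line) "," 1).getD []).getD 0 ""))
      (PySem.Str.strip (((PySem.Str.splitMax? (PySem.Str.strip line) "," 1).getD []).getD 1 ""))

def group_by_first_word (text_lines : List String) : List (String × List String) :=
  (text_lines.foldl pvGroupLine PySem.Dict.empty).items

-- ===== PORT B =====
-- phase 1 of Source B, one loop iteration: append the (first, rest) pair of a usable line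
def pvParseStep (pairs : List (String × String)) (line : String) : List (String × String) :=
  if PySem.Str.strip line ≠ "" ∧ PySem.Str.isIn "," (PySem.Str.strip line) then
    pairs ++ [(PySem.Str.strip (((PySem.Str.splitMax? (PySem.Str.strip line) "," 1).getD []).getD 0 ""),
               PySem.Str.strip (((PySem.Str.splitMax? (PySem.Str.strip line) "," 1).getD []).getD 1 ""))]
  else pairs

def group_by_first_word_alt (text_lines : List String) : List (String × List String) :=
  let pairs := text_lines.foldl pvParseStep []
  let keys := PySem.List.dedup (pairs.map (fun p => p.1))
  keys.map (fun k => (k, (pairs.filter (fun p => p.1 == k)).map (fun p => k ++ ", " ++ p.2)))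

-- ===== PRECONDITION & SPEC =====
def Spec_group_by_first_word (text_lines : List String) (out : List (String × List String)) : Prop := out = group_by_first_word_alt text_lines
instance (text_lines : List String) (out : List (String × List String)) : Decidable (Spec_group_by_first_word text_lines out) := by unfold Spec_group_by_first_word; infer_instance

-- ===== CLAIM (what is proved, stated in full; the proofs are below) =====
def Claim_equal_group_by_first_word : Prop := ∀ (text_lines : List String), Dom_group_by_first_word text_lines → Spec_group_by_first_word text_lines (group_by_first_word text_lines)

-- ===== LEMMAS AND PROOFS =====

-- what one line contributes: `none` iff both programs skip it
def pvParse (line : String) : Option (String × String) :=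
  if PySem.Str.strip line ≠ "" ∧ PySem.Str.isIn "," (PySem.Str.strip line) then
    some (PySem.Str.strip (((PySem.Str.splitMax? (PySem.Str.strip line) "," 1).getD []).getD 0 ""),
          PySem.Str.strip (((PySem.Str.splitMax? (PySem.Str.strip line) "," 1).getD []).getD 1 ""))
  else none

-- the (key, formatted line) pair A feeds to its dict
def pvFmt (p : String × String) : String × String := (p.1, p.1 ++ ", " ++ p.2)

theorem pvParseLines_eq (text_lines : List String) :
    ∀ (acc : List (String × String)),
      text_lines.foldl pvParseStep acc = acc ++ text_lines.filterMap pvParse := by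
  induction text_lines with
  | nil => intro acc; rw [List.foldl_nil, List.filterMap_nil, List.append_nil]
  | cons l t ih =>
    intro acc
    rw [List.foldl_cons, List.filterMap_cons]
    by_cases h : PySem.Str.strip l ≠ "" ∧ PySem.Str.isIn "," (PySem.Str.strip l) = true
    · rw [pvParseStep, if_pos h, ih]
      rw [pvParse, if_pos h, List.append_assoc, List.singleton_append]
    · rw [pvParseStep, if_neg h, ih, pvParse, if_neg h]

-- A's skip-or-update step, rewritten as a single dict.modify
theorem pvGroupLine_eq (d : PySem.Dict String (List String)) (line : String) :
    pvGroupLine d line =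
      match pvParse line with
      | none => d
      | some p => d.modify (pvFmt p).1 [] (fun v => v ++ [(pvFmt p).2]) := by
  unfold pvGroupLine pvParse pvFmt
  by_cases h : PySem.Str.strip line ≠ "" ∧ PySem.Str.isIn "," (PySem.Str.strip line) = true
  · have hg : ¬ ((PySem.Str.strip line = "" || !(PySem.Str.isIn "," (PySem.Str.strip line))) = true) := by
      simp only [Bool.or_eq_true, decide_eq_true_eq, Bool.not_eq_true']
      rintro (h1 | h2)
      · exact h.1 h1
      · rw [h.2] at h2; cases h2
    rw [if_neg hg, if_pos h]
    unfold pvGroupAdd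
    set k := PySem.Str.strip (((PySem.Str.splitMax? (PySem.Str.strip line) "," 1).getD []).getD 0 "") with hk
    by_cases hc : d.contains k = true
    · rw [if_neg (by simp [hc])]
    · rw [if_pos (by simp [Bool.eq_false_iff.mpr hc])]
      simp only [PySem.Dict.modify]
      rw [PySem.Dict.getD_insert_self, PySem.Dict.insert_insert_self,
        PySem.Dict.getD_of_not_contains d [] (Bool.eq_false_iff.mpr hc)]
  · have hg : (PySem.Str.strip line = "" || !(PySem.Str.isIn "," (PySem.Str.strip line))) = true := by
      simp only [Bool.or_eq_true, decide_eq_true_eq, Bool.not_eq_true']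
      rcases not_and_or.mp h with h1 | h2
      · exact Or.inl (not_not.mp h1)
      · exact Or.inr (Bool.eq_false_iff.mpr h2)
    rw [if_pos hg, if_neg h]

theorem pvFold_eq (text_lines : List String) (d : PySem.Dict String (List String)) :
    text_lines.foldl pvGroupLine d =
      ((text_lines.filterMap pvParse).map pvFmt).foldl
        (fun d p => d.modify p.1 [] (fun v => v ++ [p.2])) d := by
  induction text_lines generalizing d with
  | nil => rfl
  | cons l t ih =>
    rw [List.foldl_cons, List.filterMap_cons, pvGroupLine_eq]
    cases hp : pvParse l with
    | none => exact ih d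
    | some p => rw [List.map_cons, List.foldl_cons]; exact ih _

theorem group_by_first_word_eq_alt (text_lines : List String) :
    group_by_first_word text_lines = group_by_first_word_alt text_lines := by
  unfold group_by_first_word group_by_first_word_alt
  rw [pvFold_eq, pvParseLines_eq text_lines []]
  rw [List.nil_append]
  show _ = List.map _ (PySem.List.dedup ((text_lines.filterMap pvParse).map (fun p => p.1)))
  set q := text_lines.filterMap pvParse with hq
  set D := ((q.map pvFmt).foldl (fun d p => d.modify p.1 [] (fun v => v ++ [p.2]))
    PySem.Dict.empty) with hD
  have hkeys : D.keys = PySem.Set.ofList (q.map (fun p => p.1)) := by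
    rw [hD, PySem.Dict.keys_foldl_modify_key (q.map pvFmt) (fun p => p.1) []
      (fun _ p => fun v => v ++ [p.2]) PySem.Dict.empty]
    rw [PySem.Dict.keys_empty, PySem.Set.update_nil_left, List.map_map]
    rfl
  have hnodup : D.keys.Nodup := by
    rw [hD]
    exact PySem.Dict.nodup_keys_foldl_modify_key (q.map pvFmt) (fun p => p.1) []
      (fun _ p => fun v => v ++ [p.2]) PySem.Dict.empty (by simp [PySem.Dict.keys_empty])
  rw [PySem.Dict.items_eq_map_keys D hnodup [], hkeys, PySem.List.dedup_eq_ofList]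
  refine List.map_congr_left ?_
  intro k _
  have hget : D.getD k [] = ((q.map pvFmt).filter (fun p => p.1 == k)).map (fun p => p.2) := by
    rw [hD, PySem.Dict.getD_foldl_modify_append (q.map pvFmt) PySem.Dict.empty k]
    rw [PySem.Dict.getD_empty, List.nil_append]
  rw [hget]
  have hfilter : (q.map pvFmt).filter (fun p => p.1 == k)
      = (q.filter (fun p => p.1 == k)).map pvFmt := by
    rw [List.filter_map]
    rfl
  rw [hfilter, List.map_map]
  refine congrArg (Prod.mk k) (List.map_congr_left ?_)
  intro p hp
  have hpk : p.1 = k := by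
    have := List.of_mem_filter hp
    simpa using this
  simp only [Function.comp, pvFmt, hpk]

-- ===== VERDICT (by name: the statement is the Claim_ definition above) =====
theorem group_by_first_word_spec : Claim_equal_group_by_first_word := by
  intro text_lines _
  unfold Spec_group_by_first_word
  exact group_by_first_word_eq_alt text_lines
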